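-- pv_equiv track=rewrite | github.com/GabrielOlem/TCPChat | Client4.py | limpa
-- ===== SOURCE A (Python) =====
-- def limpa(a):
--     saida = ''
--     if a[0] == '\n':
--         a = a[1:]
--     for i in range(len(a)):
--         if i + 1 != len(a) and a[i] == '\n' and a[i+1] == '\n':
--             i += 1
--         else:
--             saida += a[i]
--     return saida
-- ===== SOURCE B (Python) =====
-- def limpa(a):
--     if a[0] == '\n':
--         a = a[1:]
--     out = []
--     i = 0
--     n = len(a)
--     while i < n:
--         c = a[i]
--         out.append(c)
--         i += 1
--         if c == '\n':
--             while i < n and a[i] == '\n':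
--                 i += 1
--     return ''.join(out)
-- ===== Notes on version B (the rewrite author's own statement) =====
-- stated objective: alternative
-- what changed: Replaces A's index loop with one-char lookahead and string concatenation by a run-skipping scan (emit a newline, then skip the rest of its run) collecting characters into a list joined once; Pre_ excludes only the empty string, on which A raises IndexError.
import Mathlib
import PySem

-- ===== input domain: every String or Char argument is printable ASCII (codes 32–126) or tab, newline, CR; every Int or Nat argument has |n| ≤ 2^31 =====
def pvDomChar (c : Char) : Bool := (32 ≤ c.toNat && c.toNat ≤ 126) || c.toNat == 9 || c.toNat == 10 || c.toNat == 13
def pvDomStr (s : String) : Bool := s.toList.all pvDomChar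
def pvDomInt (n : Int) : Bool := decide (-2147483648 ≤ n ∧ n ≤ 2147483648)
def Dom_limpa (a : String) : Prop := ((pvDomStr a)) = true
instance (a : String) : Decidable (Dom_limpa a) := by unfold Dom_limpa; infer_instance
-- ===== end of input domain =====

-- B: run-skipping scan instead of A's index loop with lookahead; Pre_ excludes only "" (A raises IndexError there).

-- ===== PORT A =====
-- for i in range(len(a)): skip a[i] when it is '\n' followed by '\n', else append it
def limpa (a : String) : String :=
  let l0 := a.toList
  let l := if PySem.List.pyGetD l0 0 ' ' = '\n' then PySem.List.slice l0 (some 1) none else l0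
  let saida := (PySem.List.pyRange 0 (l.length : Int) 1).foldl
    (fun acc i =>
      if i + 1 ≠ (l.length : Int) ∧ PySem.List.pyGetD l i ' ' = '\n' ∧ PySem.List.pyGetD l (i + 1) ' ' = '\n'
      then acc
      else acc ++ [PySem.List.pyGetD l i ' ']) []
  String.ofList saida

-- ===== PORT B =====
-- the while loop of Source B: emit the current char; after a '\n', skip the rest of its run
def limpaSkip : List Char → List Char
  | [] => []
  | c :: rest =>
    if c = '\n' then '\n' :: limpaSkip (rest.dropWhile (· = '\n'))
    else c :: limpaSkip rest
  termination_by l => l.length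
  decreasing_by
    · exact Nat.lt_succ_of_le (List.length_dropWhile_le _ _)
    · simp

def limpa_alt (a : String) : String :=
  let l0 := a.toList
  let l := if PySem.List.pyGetD l0 0 ' ' = '\n' then PySem.List.slice l0 (some 1) none else l0
  String.ofList (limpaSkip l)

-- ===== PRECONDITION & SPEC =====
-- A (and B) evaluate a[0] first: the empty string raises IndexError, everything else returns.
def Pre_limpa (a : String) : Prop := a.toList ≠ []
instance (a : String) : Decidable (Pre_limpa a) := by unfold Pre_limpa; infer_instance
def pvWitness_limpa : String := "a\n\nb"

def Spec_limpa (a : String) (out : String) : Prop := out = limpa_alt a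
instance (a : String) (out : String) : Decidable (Spec_limpa a out) := by unfold Spec_limpa; infer_instance

-- ===== CLAIM (what is proved, stated in full; the proofs are below) =====
def Claim_equal_limpa : Prop := ∀ (a : String), Dom_limpa a → Pre_limpa a → Spec_limpa a (limpa a)

-- ===== LEMMAS AND PROOFS =====

lemma limpaSkip_nil : limpaSkip [] = [] := by simp [limpaSkip]

lemma limpaSkip_singleton (c : Char) : limpaSkip [c] = [c] := by
  by_cases h : c = '\n' <;> simp [limpaSkip, h]

lemma limpaSkip_two (c d : Char) (rest : List Char) :
    limpaSkip (c :: d :: rest) =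
      if c = '\n' ∧ d = '\n' then limpaSkip (d :: rest) else c :: limpaSkip (d :: rest) := by
  by_cases hc : c = '\n'
  · by_cases hd : d = '\n'
    · subst hc hd
      rw [limpaSkip, limpaSkip]
      simp
    · subst hc
      rw [limpaSkip]
      simp [hd, List.dropWhile]
  · rw [limpaSkip]
    simp [hc]

-- the loop of A over the suffix `suf` of `pre ++ suf`, starting at index pre.length, appends limpaSkip suf
lemma loop_eq_limpaSkip (suf : List Char) : ∀ (pre acc : List Char),
    (PySem.List.pyRange (pre.length : Int) ((pre.length + suf.length : Nat) : Int) 1).foldl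
      (fun acc i =>
        if i + 1 ≠ ((pre.length + suf.length : Nat) : Int)
            ∧ PySem.List.pyGetD (pre ++ suf) i ' ' = '\n'
            ∧ PySem.List.pyGetD (pre ++ suf) (i + 1) ' ' = '\n'
        then acc
        else acc ++ [PySem.List.pyGetD (pre ++ suf) i ' ']) acc
    = acc ++ limpaSkip suf := by
  induction suf with
  | nil =>
    intro pre acc
    simp [PySem.List.pyRange_one_eq_nil, limpaSkip_nil]
  | cons c rest ih =>
    intro pre acc
    have hlt : (pre.length : Int) < ((pre.length + (c :: rest).length : Nat) : Int) := by
      simp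
    rw [PySem.List.pyRange_one_cons hlt, List.foldl_cons]
    have hget : PySem.List.pyGetD (pre ++ c :: rest) (pre.length : Int) ' ' = c := by
      simp [PySem.List.pyGetD]
    cases rest with
    | nil =>
      -- last element: the condition i+1 ≠ len is false, keep c
      have hcond : ¬ (((pre.length : Int) + 1 ≠ ((pre.length + ([c] : List Char).length : Nat) : Int))
          ∧ PySem.List.pyGetD (pre ++ [c]) (pre.length : Int) ' ' = '\n'
          ∧ PySem.List.pyGetD (pre ++ [c]) ((pre.length : Int) + 1) ' ' = '\n') := by
        intro ⟨h1, _, _⟩; apply h1; simp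
      rw [if_neg hcond, hget]
      have : ((pre.length : Int) + 1) = (((pre ++ [c]).length : Nat) : Int) := by simp
      rw [this]
      simp [PySem.List.pyRange_one_eq_nil, limpaSkip_singleton]
    | cons d rest' =>
      have hget2 : PySem.List.pyGetD (pre ++ c :: d :: rest') ((pre.length : Int) + 1) ' ' = d := by
        have h1 : pre ++ c :: d :: rest' = (pre ++ [c]) ++ d :: rest' := by simp
        have h2 : ((pre.length : Int) + 1) = (((pre ++ [c]).length : Nat) : Int) := by simp
        have h := PySem.List.pyGet?_append_right (pre := pre) (ys := c :: d :: rest') (k := 1)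
        simp [PySem.List.pyGetD]
        norm_num at h
        simp [h]
      have hne : ((pre.length : Int) + 1 ≠ ((pre.length + (c :: d :: rest').length : Nat) : Int)) := by
        simp; omega
      have hrange : (PySem.List.pyRange ((pre.length : Int) + 1)
            ((pre.length + (c :: d :: rest').length : Nat) : Int) 1)
          = PySem.List.pyRange (((pre ++ [c]).length : Nat) : Int)
            (((pre ++ [c]).length + (d :: rest').length : Nat) : Int) 1 := by
        congr 1
        · simp
        · simp
          omega
      have hlist : pre ++ c :: d :: rest' = (pre ++ [c]) ++ d :: rest' := by simp
      have hlen : ((pre.length + (c :: d :: rest').length : Nat) : Int)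
          = (((pre ++ [c]).length + (d :: rest').length : Nat) : Int) := by simp; omega
      by_cases hcd : c = '\n' ∧ d = '\n'
      · rw [if_pos ⟨hne, by rw [hget]; exact hcd.1, by rw [hget2]; exact hcd.2⟩]
        rw [hrange]
        have := ih (pre ++ [c]) acc
        rw [hlist, hlen]
        rw [this, limpaSkip_two, if_pos hcd]
      · have hcond : ¬ (((pre.length : Int) + 1 ≠ ((pre.length + (c :: d :: rest').length : Nat) : Int))
            ∧ PySem.List.pyGetD (pre ++ c :: d :: rest') (pre.length : Int) ' ' = '\n'
            ∧ PySem.List.pyGetD (pre ++ c :: d :: rest') ((pre.length : Int) + 1) ' ' = '\n') := by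
          intro ⟨_, h2, h3⟩
          rw [hget] at h2; rw [hget2] at h3
          exact hcd ⟨h2, h3⟩
        rw [if_neg hcond, hget, hrange]
        have := ih (pre ++ [c]) (acc ++ [c])
        rw [hlist, hlen, this, limpaSkip_two, if_neg hcd, List.append_assoc]
        rfl

lemma loop_eq_limpaSkip_zero (l : List Char) :
    (PySem.List.pyRange 0 ((l.length : Nat) : Int) 1).foldl
      (fun acc i =>
        if i + 1 ≠ ((l.length : Nat) : Int)
            ∧ PySem.List.pyGetD l i ' ' = '\n'
            ∧ PySem.List.pyGetD l (i + 1) ' ' = '\n'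
        then acc
        else acc ++ [PySem.List.pyGetD l i ' ']) []
    = limpaSkip l := by
  have := loop_eq_limpaSkip l [] []
  simpa using this

-- ===== VERDICT (by name: the statement is the Claim_ definition above) =====
theorem limpa_spec : Claim_equal_limpa := by
  intro a _ _
  unfold Spec_limpa limpa limpa_alt
  simp only
  rw [loop_eq_limpaSkip_zero]
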